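-- pv_equiv track=rewrite | github.com/leejseo/PS | ACM-ICPC/Korea Regional/2018/F.py | check_rec
-- ===== SOURCE A (Python) =====
-- EXP = ["+", "-", "/", "*", "%"]
--
-- def check_rec(S):
--     if len(S) == 3 and S[0].isalpha() and S[1] in EXP and S[2].isalpha():
--         return True
--     n = len(S)
--     for i in range(n-4):
--         if S[i]=="(" and S[i+1].isalpha() and S[i+2] in EXP \
--            and S[i+3].isalpha() and S[i+4]==")":
--             return check_rec(S[:i] + ["a"] + S[i+5:])
--     return False
-- ===== SOURCE B (Python) =====
-- EXP = ["+", "-", "/", "*", "%"]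
--
-- def check_rec(S):
--     st = []
--     for t in S:
--         if t == ")" and len(st) >= 4 and st[-4] == "(" and st[-3].isalpha() \
--            and st[-2] in EXP and st[-1].isalpha():
--             del st[-4:]
--             st.append("a")
--         else:
--             st.append(t)
--     return len(st) == 3 and st[0].isalpha() and st[1] in EXP and st[2].isalpha()
-- ===== Notes on version B (the rewrite author's own statement) =====
-- stated objective: alternative
-- what changed: Replaces A's repeated scan-for-leftmost-redex plus list-rebuild recursion with a single left-to-right pass over the tokens keeping an explicit stack that collapses '( x op y )' the moment the closing parenthesis is read.
import Mathlib
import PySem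

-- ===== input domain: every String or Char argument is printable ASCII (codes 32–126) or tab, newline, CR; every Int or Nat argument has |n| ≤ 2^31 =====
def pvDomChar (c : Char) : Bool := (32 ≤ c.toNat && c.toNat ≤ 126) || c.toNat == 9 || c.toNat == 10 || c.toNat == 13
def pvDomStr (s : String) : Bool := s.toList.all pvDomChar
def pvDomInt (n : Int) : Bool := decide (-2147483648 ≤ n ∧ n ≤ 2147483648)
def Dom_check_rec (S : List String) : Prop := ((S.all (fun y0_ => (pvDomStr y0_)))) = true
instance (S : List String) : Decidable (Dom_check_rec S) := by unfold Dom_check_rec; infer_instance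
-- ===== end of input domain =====

-- B replaces A's repeated leftmost-redex search + list-rebuild recursion by a single
-- left-to-right pass with an explicit stack that reduces "( x op y )" as soon as the
-- closing parenthesis arrives (objective: alternative, one pass).

-- ===== PORT A =====
def pvEXP : List String := ["+", "-", "/", "*", "%"]

def pvCondA (S : List String) (i : Int) : Bool :=
  PySem.List.pyGetD S i "" == "(" &&
  PySem.Str.strIsalpha (PySem.List.pyGetD S (i+1) "") &&
  pvEXP.contains (PySem.List.pyGetD S (i+2) "") &&
  PySem.Str.strIsalpha (PySem.List.pyGetD S (i+3) "") &&
  PySem.List.pyGetD S (i+4) "" == ")"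

def check_rec (S : List String) : Bool :=
  if S.length == 3 && PySem.Str.strIsalpha (PySem.List.pyGetD S 0 "") &&
     pvEXP.contains (PySem.List.pyGetD S 1 "") &&
     PySem.Str.strIsalpha (PySem.List.pyGetD S 2 "") then
    true
  else
    match hfind : (PySem.List.pyRange 0 ((S.length : Int) - 4) 1).find? (pvCondA S) with
    | some i =>
        check_rec (PySem.List.slice S none (some i) ++ ["a"] ++
                   PySem.List.slice S (some (i+5)) none)
    | none => false
termination_by S.length
decreasing_by
  have hmem := List.mem_of_find?_eq_some hfind
  rw [PySem.List.mem_pyRange_one] at hmem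
  rw [PySem.List.slice_to S hmem.1, PySem.List.slice_from S (show (0:Int) ≤ i+5 by omega)]
  simp only [List.length_append, List.length_take, List.length_drop, List.length_cons,
    List.length_nil]
  omega

-- ===== PORT B =====
def pvStepB (st : List String) (t : String) : List String :=
  if t == ")" && decide (4 ≤ st.length) &&
     PySem.List.pyGetD st (-4) "" == "(" &&
     PySem.Str.strIsalpha (PySem.List.pyGetD st (-3) "") &&
     pvEXP.contains (PySem.List.pyGetD st (-2) "") &&
     PySem.Str.strIsalpha (PySem.List.pyGetD st (-1) "")
  then st.take (st.length - 4) ++ ["a"]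
  else st ++ [t]

def check_rec_alt (S : List String) : Bool :=
  let st := S.foldl pvStepB []
  st.length == 3 && PySem.Str.strIsalpha (PySem.List.pyGetD st 0 "") &&
  pvEXP.contains (PySem.List.pyGetD st 1 "") &&
  PySem.Str.strIsalpha (PySem.List.pyGetD st 2 "")

-- ===== PRECONDITION & SPEC =====
def Spec_check_rec (S : List String) (out : Bool) : Prop := out = check_rec_alt S
instance (S : List String) (out : Bool) : Decidable (Spec_check_rec S out) := by unfold Spec_check_rec; infer_instance

-- ===== CLAIM (what is proved, stated in full; the proofs are below) =====
def Claim_equal_check_rec : Prop := ∀ (S : List String), Dom_check_rec S → Spec_check_rec S (check_rec S)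

-- ===== LEMMAS AND PROOFS =====

-- A token that is part of a redex body ("(", an alphabetic word, an operator) is never ")".
theorem pv_alpha_ne_rparen {x : String} (h : PySem.Str.strIsalpha x = true) : x ≠ ")" := by
  intro he; subst he; revert h; decide

theorem pv_op_ne_rparen {op : String} (h : pvEXP.contains op = true) : op ≠ ")" := by
  intro he; subst he; revert h; decide

-- Pushing a non-")" token never reduces.
theorem pv_step_push (st : List String) {t : String} (ht : t ≠ ")") :
    pvStepB st t = st ++ [t] := by
  unfold pvStepB
  have : (t == ")") = false := by simpa using ht
  simp [this]

-- last four stack entries, read with Python's negative indexing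
theorem pv_get_tail4 (st : List String) (a b c d : String) :
    PySem.List.pyGetD (st ++ [a,b,c,d]) (-4) "" = a ∧
    PySem.List.pyGetD (st ++ [a,b,c,d]) (-3) "" = b ∧
    PySem.List.pyGetD (st ++ [a,b,c,d]) (-2) "" = c ∧
    PySem.List.pyGetD (st ++ [a,b,c,d]) (-1) "" = d := by
  refine ⟨?_, ?_, ?_, ?_⟩
  · rw [PySem.List.pyGetD_neg_ofNat _ 4 "" (by omega) (by simp)]
    simp [List.getElem_append_right]
  · rw [PySem.List.pyGetD_neg_ofNat _ 3 "" (by omega) (by simp)]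
    rw [List.getElem_append_right (by simp)]
    simp
  · rw [PySem.List.pyGetD_neg_ofNat _ 2 "" (by omega) (by simp)]
    rw [List.getElem_append_right (by simp)]
    simp
  · rw [PySem.List.pyGetD_neg_ofNat _ 1 "" (by omega) (by simp)]
    rw [List.getElem_append_right (by simp)]
    simp

-- processing a complete innermost redex collapses it to "a" on any stack
theorem pv_redex_fold (st : List String) {x op y : String}
    (hx : PySem.Str.strIsalpha x = true) (hop : pvEXP.contains op = true)
    (hy : PySem.Str.strIsalpha y = true) :
    List.foldl pvStepB st ["(", x, op, y, ")"] = st ++ ["a"] := by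
  simp only [List.foldl_cons, List.foldl_nil]
  rw [pv_step_push st (by decide), pv_step_push _ (pv_alpha_ne_rparen hx),
      pv_step_push _ (pv_op_ne_rparen hop), pv_step_push _ (pv_alpha_ne_rparen hy)]
  have hE : (((st ++ ["("]) ++ [x]) ++ [op]) ++ [y] = st ++ ["(", x, op, y] := by simp
  rw [hE]
  obtain ⟨h4, h3, h2, h1⟩ := pv_get_tail4 st "(" x op y
  unfold pvStepB
  rw [h4, h3, h2, h1]
  have hlen : (st ++ ["(", x, op, y]).length = st.length + 4 := by simp
  simp only [hx, hop, hy, hlen]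
  rw [if_pos (by simp)]
  rw [show st.length + 4 - 4 = st.length from by omega, List.take_left' rfl]

-- one reduction step anywhere in the input does not change the final stack
theorem pv_invariance (st : List String) (pre post : List String) {x op y : String}
    (hx : PySem.Str.strIsalpha x = true) (hop : pvEXP.contains op = true)
    (hy : PySem.Str.strIsalpha y = true) :
    List.foldl pvStepB st (pre ++ "(" :: x :: op :: y :: ")" :: post) =
    List.foldl pvStepB st (pre ++ "a" :: post) := by
  have h1 : pre ++ "(" :: x :: op :: y :: ")" :: post
      = (pre ++ ["(", x, op, y, ")"]) ++ post := by simp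
  have h2 : pre ++ "a" :: post = (pre ++ ["a"]) ++ post := by simp
  rw [h1, h2, List.foldl_append, List.foldl_append, List.foldl_append, List.foldl_append]
  rw [pv_redex_fold _ hx hop hy]
  simp only [List.foldl_cons, List.foldl_nil]
  rw [pv_step_push _ (by decide)]

-- splitting a list around five consecutive positions
theorem pv_split5 (S : List String) (k : Nat) (h : k + 5 ≤ S.length) :
    S = S.take k ++ S[k] :: S[k+1] :: S[k+2] :: S[k+3] :: S[k+4] :: S.drop (k+5) := by
  have h0 : S.drop k = S[k] :: S.drop (k+1) := (List.getElem_cons_drop (by omega)).symm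
  have h1 : S.drop (k+1) = S[k+1] :: S.drop (k+2) := (List.getElem_cons_drop (by omega)).symm
  have h2 : S.drop (k+2) = S[k+2] :: S.drop (k+3) := (List.getElem_cons_drop (by omega)).symm
  have h3 : S.drop (k+3) = S[k+3] :: S.drop (k+4) := (List.getElem_cons_drop (by omega)).symm
  have h4 : S.drop (k+4) = S[k+4] :: S.drop (k+5) := (List.getElem_cons_drop (by omega)).symm
  conv_lhs => rw [← List.take_append_drop k S, h0, h1, h2, h3, h4]

-- splitting off the last four elements
theorem pv_split4 (T : List String) (m : Nat) (hm : T.length = m + 4) :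
    T = T.take m ++ [T[m]'(by omega), T[m+1]'(by omega), T[m+2]'(by omega), T[m+3]'(by omega)] := by
  have h0 : T.drop m = T[m]'(by omega) :: T.drop (m+1) := (List.getElem_cons_drop (by omega)).symm
  have h1 : T.drop (m+1) = T[m+1]'(by omega) :: T.drop (m+2) := (List.getElem_cons_drop (by omega)).symm
  have h2 : T.drop (m+2) = T[m+2]'(by omega) :: T.drop (m+3) := (List.getElem_cons_drop (by omega)).symm
  have h3 : T.drop (m+3) = T[m+3]'(by omega) :: T.drop (m+4) := (List.getElem_cons_drop (by omega)).symm
  have h4 : T.drop (m+4) = [] := List.drop_eq_nil_of_le (by omega)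
  conv_lhs => rw [← List.take_append_drop m T, h0, h1, h2, h3, h4]

-- if S contains no redex, the stack pass is the identity
theorem pv_noredex_fold (S : List String)
    (h : ∀ pre x op y post, S = pre ++ "(" :: x :: op :: y :: ")" :: post →
         ¬ (PySem.Str.strIsalpha x = true ∧ pvEXP.contains op = true ∧
            PySem.Str.strIsalpha y = true)) :
    List.foldl pvStepB [] S = S := by
  induction S using List.reverseRecOn with
  | nil => simp
  | append_singleton T t ih =>
    have hT : ∀ pre x op y post, T = pre ++ "(" :: x :: op :: y :: ")" :: post →
        ¬ (PySem.Str.strIsalpha x = true ∧ pvEXP.contains op = true ∧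
           PySem.Str.strIsalpha y = true) := by
      intro pre x op y post hdec
      apply h pre x op y (post ++ [t])
      rw [hdec]
      simp
    rw [List.foldl_append, ih hT]
    simp only [List.foldl_cons, List.foldl_nil]
    unfold pvStepB
    split
    · next hcond =>
      exfalso
      simp only [Bool.and_eq_true, beq_iff_eq, decide_eq_true_eq] at hcond
      obtain ⟨⟨⟨⟨⟨ht, hlen⟩, hlp⟩, hxa⟩, hopc⟩, hya⟩ := hcond
      obtain ⟨m, hm⟩ : ∃ m, T.length = m + 4 := ⟨T.length - 4, by omega⟩
      have hsplit := pv_split4 T m hm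
      obtain ⟨g4, g3, g2, g1⟩ := pv_get_tail4 (T.take m)
        (T[m]'(by omega)) (T[m+1]'(by omega)) (T[m+2]'(by omega)) (T[m+3]'(by omega))
      rw [hsplit] at hlp hxa hopc hya
      rw [g4] at hlp; rw [g3] at hxa; rw [g2] at hopc; rw [g1] at hya
      refine h (T.take m) (T[m+1]'(by omega)) (T[m+2]'(by omega)) (T[m+3]'(by omega)) []
        ?_ ⟨hxa, hopc, hya⟩
      rw [ht]
      conv_lhs => rw [hsplit]
      rw [hlp]
      simp
    · rfl

-- reading position pre.length + j of pre ++ l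
theorem pv_getD_append (pre l : List String) (j : Nat) (hj : j < l.length) :
    PySem.List.pyGetD (pre ++ l) ((pre.length : Int) + (j : Int)) "" = l[j] := by
  rw [show ((pre.length : Int) + (j : Int)) = ((pre.length + j : Nat) : Int) from by push_cast; ring]
  rw [PySem.List.pyGetD_natCast]
  rw [List.getD_eq_getElem?_getD, List.getElem?_append_right (by omega)]
  rw [show pre.length + j - pre.length = j from by omega]
  rw [List.getElem?_eq_getElem hj]
  rfl

-- pvCondA holds at the start position of any redex decomposition
theorem pv_condA_at (pre post : List String) (x op y : String)
    (hx : PySem.Str.strIsalpha x = true) (hop : pvEXP.contains op = true)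
    (hy : PySem.Str.strIsalpha y = true) :
    pvCondA (pre ++ "(" :: x :: op :: y :: ")" :: post) ((pre.length : Int)) = true := by
  unfold pvCondA
  have e0 := pv_getD_append pre ("(" :: x :: op :: y :: ")" :: post) 0 (by simp)
  have e1 := pv_getD_append pre ("(" :: x :: op :: y :: ")" :: post) 1 (by simp)
  have e2 := pv_getD_append pre ("(" :: x :: op :: y :: ")" :: post) 2 (by simp)
  have e3 := pv_getD_append pre ("(" :: x :: op :: y :: ")" :: post) 3 (by simp)
  have e4 := pv_getD_append pre ("(" :: x :: op :: y :: ")" :: post) 4 (by simp)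
  simp only [Nat.cast_zero, Nat.cast_one, Nat.cast_ofNat, add_zero] at e0 e1 e2 e3 e4
  simp only [List.getElem_cons_zero, List.getElem_cons_succ] at e0 e1 e2 e3 e4
  rw [e0, e1, e2, e3, e4]
  simp only [hx, hop, hy]
  rfl

-- the two final triple checks coincide syntactically
theorem pv_alt_of_stack (S : List String) (hst : List.foldl pvStepB [] S = S) :
    check_rec_alt S = (S.length == 3 && PySem.Str.strIsalpha (PySem.List.pyGetD S 0 "") &&
      pvEXP.contains (PySem.List.pyGetD S 1 "") &&
      PySem.Str.strIsalpha (PySem.List.pyGetD S 2 "")) := by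
  unfold check_rec_alt
  rw [hst]

theorem pv_main (n : Nat) : ∀ S : List String, S.length = n → check_rec S = check_rec_alt S := by
  induction n using Nat.strong_induction_on with
  | _ n ih =>
    intro S hlen
    rw [check_rec]
    by_cases hc : (S.length == 3 && PySem.Str.strIsalpha (PySem.List.pyGetD S 0 "") &&
        pvEXP.contains (PySem.List.pyGetD S 1 "") &&
        PySem.Str.strIsalpha (PySem.List.pyGetD S 2 "")) = true
    · rw [if_pos hc]
      simp only [Bool.and_eq_true, beq_iff_eq] at hc
      obtain ⟨⟨⟨h3, hx⟩, hop⟩, hy⟩ := hc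
      obtain ⟨a, b, c, hS⟩ := List.length_eq_three.mp h3
      subst hS
      rw [PySem.List.pyGetD_zero] at hx
      rw [PySem.List.pyGetD_ofNat' _ 1] at hop
      rw [PySem.List.pyGetD_ofNat' _ 2] at hy
      simp only [List.getD] at hx hop hy
      simp only [List.getElem?_cons_zero, List.getElem?_cons_succ, Option.getD_some] at hx hop hy
      have hstack : List.foldl pvStepB [] [a, b, c] = [a, b, c] := by
        simp only [List.foldl_cons, List.foldl_nil]
        rw [pv_step_push _ (pv_alpha_ne_rparen hx), pv_step_push _ (pv_op_ne_rparen hop),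
            pv_step_push _ (pv_alpha_ne_rparen hy)]
        rfl
      rw [pv_alt_of_stack _ hstack]
      symm
      rw [PySem.List.pyGetD_zero, PySem.List.pyGetD_ofNat' _ 1, PySem.List.pyGetD_ofNat' _ 2]
      simp only [List.getD_cons_zero, List.getD_cons_succ, hx, hop, hy]
      rfl
    · rw [if_neg hc]
      cases hfind : (PySem.List.pyRange 0 ((S.length : Int) - 4) 1).find? (pvCondA S) with
      | some i =>
        have hmem := List.mem_of_find?_eq_some hfind
        rw [PySem.List.mem_pyRange_one] at hmem
        have hcond := List.find?_some hfind
        set k := i.toNat with hk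
        have hik : i = (k : Int) := by omega
        have hk5 : k + 5 ≤ S.length := by omega
        unfold pvCondA at hcond
        rw [PySem.List.pyGetD_eq_getElem _ "" (by omega) (by omega)] at hcond
        rw [PySem.List.pyGetD_eq_getElem _ "" (by omega) (by omega)] at hcond
        rw [PySem.List.pyGetD_eq_getElem _ "" (by omega) (by omega)] at hcond
        rw [PySem.List.pyGetD_eq_getElem _ "" (by omega) (by omega)] at hcond
        rw [PySem.List.pyGetD_eq_getElem _ "" (by omega) (by omega)] at hcond
        simp only [show (i+1).toNat = k+1 from by omega, show (i+2).toNat = k+2 from by omega,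
            show (i+3).toNat = k+3 from by omega, show (i+4).toNat = k+4 from by omega,
            ← hk] at hcond
        simp only [Bool.and_eq_true, beq_iff_eq] at hcond
        obtain ⟨⟨⟨⟨hlp, hxa⟩, hopc⟩, hya⟩, hrp⟩ := hcond
        have hS5 : S = S.take k ++ "(" :: S[k+1] :: S[k+2] :: S[k+3] :: ")" :: S.drop (k+5) := by
          rw [← hlp, ← hrp]
          exact pv_split5 S k hk5
        have harg : PySem.List.slice S none (some i) ++ ["a"] ++
            PySem.List.slice S (some (i+5)) = S.take k ++ "a" :: S.drop (k+5) := by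
          rw [PySem.List.slice_to S (by omega), PySem.List.slice_from S (by omega)]
          rw [show (i+5).toNat = k+5 from by omega, hk]
          simp
        show check_rec (PySem.List.slice S none (some i) ++ ["a"] ++
            PySem.List.slice S (some (i+5))) = check_rec_alt S
        rw [harg]
        have hlt : (S.take k ++ "a" :: S.drop (k+5)).length < n := by
          simp only [List.length_append, List.length_cons, List.length_take, List.length_drop]
          omega
        rw [ih _ hlt _ rfl]
        unfold check_rec_alt
        have : List.foldl pvStepB [] S = List.foldl pvStepB [] (S.take k ++ "a" :: S.drop (k+5)) := by
          conv_lhs => rw [hS5]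
          exact pv_invariance [] _ _ hxa hopc hya
        rw [this]
      | none =>
        have hnone := List.find?_eq_none.mp hfind
        have hstack : List.foldl pvStepB [] S = S := by
          apply pv_noredex_fold
          intro pre x op y post hdec hred
          obtain ⟨hxa, hopc, hya⟩ := hred
          have hmem : ((pre.length : Int)) ∈ PySem.List.pyRange 0 ((S.length : Int) - 4) 1 := by
            rw [PySem.List.mem_pyRange_one]
            constructor
            · omega
            · rw [hdec]
              simp only [List.length_append, List.length_cons]
              push_cast
              omega
          refine hnone _ hmem ?_
          rw [hdec]
          exact pv_condA_at pre post x op y hxa hopc hya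
        show false = check_rec_alt S
        rw [pv_alt_of_stack _ hstack]
        simp only [hc]

-- ===== VERDICT (by name: the statement is the Claim_ definition above) =====
theorem check_rec_spec : Claim_equal_check_rec := by
  intro S _
  unfold Spec_check_rec
  exact pv_main S.length S rfl
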